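-- pv_equiv track=rewrite | github.com/dlangk/yatzy | yatzy/mechanics/yatzy_scorer.py | score_full_house
-- ===== SOURCE A (Python) =====
-- from collections import Counter
-- from typing import List
--
-- def score_full_house(dice: List[int]) -> int:
--     counts = Counter(dice)
--     has_three = None
--     has_two = None
--     for num, cnt in counts.items():
--         if cnt >= 3:
--             if has_three is None or num > has_three:
--                 has_three = num
--     if has_three is not None:
--         for num, cnt in counts.items():
--             if num != has_three and cnt >= 2:
--                 if has_two is None or num > has_two:
--                     has_two = num
--     if has_three is not None and has_two is not None:
--         return has_three * 3 + has_two * 2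
--     return 0
-- ===== SOURCE B (Python) =====
-- def score_full_house(dice):
--     faces = sorted(set(dice), reverse=True)
--     three = next((f for f in faces if dice.count(f) >= 3), None)
--     if three is None:
--         return 0
--     two = next((f for f in faces if f != three and dice.count(f) >= 2), None)
--     if two is None:
--         return 0
--     return three * 3 + two * 2
-- ===== Notes on version B (the rewrite author's own statement) =====
-- stated objective: idiomatic
-- what changed: Replaces the Counter table and the two explicit max-tracking loops by sorting the distinct faces descending once and taking the first face of each scan that has enough copies (first >=3, then first distinct >=2).
import Mathlib
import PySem

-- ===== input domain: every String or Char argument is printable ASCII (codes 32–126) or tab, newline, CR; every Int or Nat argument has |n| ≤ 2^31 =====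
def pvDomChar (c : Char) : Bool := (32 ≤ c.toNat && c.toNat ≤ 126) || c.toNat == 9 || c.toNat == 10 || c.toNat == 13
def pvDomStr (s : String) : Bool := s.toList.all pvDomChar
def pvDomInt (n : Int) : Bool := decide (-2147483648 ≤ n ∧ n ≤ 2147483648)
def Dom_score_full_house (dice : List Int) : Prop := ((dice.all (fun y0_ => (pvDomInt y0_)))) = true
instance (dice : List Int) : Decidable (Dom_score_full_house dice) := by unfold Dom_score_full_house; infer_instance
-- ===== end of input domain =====

-- B replaces A's Counter table and max-tracking loops by one descending sort of the
-- distinct faces and two first-match scans (idiomatic; no speed claim).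

-- ===== PORT A =====
def score_full_house (dice : List Int) : Int :=
  let counts := PySem.Dict.counter dice
  let has_three : Option Int := counts.items.foldl (fun (acc : Option Int) (kv : Int × Int) =>
      if kv.2 ≥ 3 then
        (match acc with
         | none => some kv.1
         | some m => if kv.1 > m then some kv.1 else some m)
      else acc) none
  let has_two : Option Int :=
    match has_three with
    | none => none
    | some t => counts.items.foldl (fun (acc : Option Int) (kv : Int × Int) =>
        if kv.1 ≠ t ∧ kv.2 ≥ 2 then
          (match acc with
           | none => some kv.1
           | some m => if kv.1 > m then some kv.1 else some m)
        else acc) none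
  match has_three, has_two with
  | some t, some w => t * 3 + w * 2
  | _, _ => 0

-- ===== PORT B =====
def score_full_house_alt (dice : List Int) : Int :=
  let faces := PySem.List.sorted (PySem.Set.ofList dice) (fun x => x) true
  match faces.find? (fun f => decide ((List.count f dice : Int) ≥ 3)) with
  | none => 0
  | some t =>
    match faces.find? (fun f => decide (f ≠ t ∧ (List.count f dice : Int) ≥ 2)) with
    | none => 0
    | some w => t * 3 + w * 2

-- ===== PRECONDITION & SPEC =====
def Spec_score_full_house (dice : List Int) (out : Int) : Prop := out = score_full_house_alt dice
instance (dice : List Int) (out : Int) : Decidable (Spec_score_full_house dice out) := by unfold Spec_score_full_house; infer_instance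

-- ===== CLAIM (what is proved, stated in full; the proofs are below) =====
def Claim_equal_score_full_house : Prop := ∀ (dice : List Int), Dom_score_full_house dice → Spec_score_full_house dice (score_full_house dice)

-- ===== LEMMAS AND PROOFS =====

-- A's running-max update step, abstracted over the filter predicate.
def pvStep (p : Int → Bool) (acc : Option Int) (x : Int) : Option Int :=
  if p x then
    (match acc with
     | none => some x
     | some m => if x > m then some x else some m)
  else acc

lemma pvFoldl_step_eq (p : Int → Bool) : ∀ (l : List Int) (acc : Option Int),
    l.foldl (pvStep p) acc = (acc.toList ++ l.filter p).max? := by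
  intro l
  induction l with
  | nil => intro acc; cases acc <;> simp
  | cons x t ih =>
    intro acc
    by_cases hp : p x
    · have hstep : pvStep p acc x =
          (match acc with | none => some x | some m => some (max m x)) := by
        cases acc with
        | none => simp [pvStep, hp]
        | some m =>
          simp only [pvStep, hp, if_true]
          by_cases h : x > m
          · simp [h, max_eq_right (le_of_lt h)]
          · simp [h, max_eq_left (le_of_not_gt h)]
      rw [List.foldl_cons, ih, hstep]
      cases acc with
      | none => simp [hp]
      | some m =>
        simp only [List.filter_cons, hp, if_true, Option.toList_some, List.cons_append,
          List.nil_append, List.max?_cons]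
        cases h : (t.filter p).max? with
        | none => simp
        | some b => simp only [Option.elim_some]; rw [max_assoc]
    · rw [List.foldl_cons]
      have : pvStep p acc x = acc := by simp [pvStep, hp]
      rw [this, ih, List.filter_cons_of_neg (by simp [hp])]

-- first match in a strictly descending list is the maximum match
lemma pvFind_desc_eq (p : Int → Bool) : ∀ (l : List Int),
    l.Pairwise (fun a b => b < a) → l.find? p = (l.filter p).max? := by
  intro l
  induction l with
  | nil => intro _; simp
  | cons x t ih =>
    intro hpw
    rcases List.pairwise_cons.mp hpw with ⟨hx, ht⟩
    by_cases hp : p x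
    · rw [List.find?_cons_of_pos hp, List.filter_cons_of_pos hp, List.max?_cons]
      cases h : (t.filter p).max? with
      | none => simp
      | some b =>
        have hb : b ∈ t.filter p := List.max?_mem h
        have hbx : b < x := hx b (List.mem_of_mem_filter hb)
        simp only [Option.elim_some]
        rw [max_eq_left (le_of_lt hbx)]
    · rw [List.find?_cons_of_neg hp, List.filter_cons_of_neg (by simp [hp]), ih ht]

lemma pvMax?_perm {l l' : List Int} (h : l.Perm l') : l.max? = l'.max? := by
  cases hm : l.max? with
  | none =>
    have hl : l = [] := List.max?_eq_none_iff.mp hm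
    subst hl
    rw [List.nil_perm.mp h]
    simp
  | some a =>
    rw [List.max?_eq_some_iff] at hm
    exact (List.max?_eq_some_iff.mpr ⟨h.mem_iff.mp hm.1, fun b hb => hm.2 b (h.mem_iff.mpr hb)⟩).symm

-- sorted(set(dice), reverse=True) is strictly descending
lemma pvFaces_desc (dice : List Int) :
    (PySem.List.sorted (PySem.Set.ofList dice) (fun x => x) true).Pairwise (fun a b => b < a) := by
  have hle := PySem.List.sorted_pairwise_rev (PySem.Set.ofList dice) (fun x => x)
  have hnd : (PySem.List.sorted (PySem.Set.ofList dice) (fun x => x) true).Nodup :=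
    (PySem.List.sorted_perm (PySem.Set.ofList dice) (fun x => x) true).nodup_iff.mpr
      (PySem.Set.nodup_ofList dice)
  have := List.Pairwise.and hle hnd
  exact this.imp (fun h => lt_of_le_of_ne h.1 (fun he => h.2 he.symm))

lemma pvScan_eq (dice : List Int) (p : Int → Bool) :
    (PySem.Set.ofList dice).foldl (pvStep p) none
      = (PySem.List.sorted (PySem.Set.ofList dice) (fun x => x) true).find? p := by
  rw [pvFoldl_step_eq, pvFind_desc_eq p _ (pvFaces_desc dice)]
  simp only [Option.toList_none, List.nil_append]
  exact pvMax?_perm (List.Perm.filter p (PySem.List.sorted_perm _ _ _).symm)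

-- ===== VERDICT (by name: the statement is the Claim_ definition above) =====
theorem score_full_house_spec : Claim_equal_score_full_house := by
  intro dice _
  unfold Spec_score_full_house score_full_house score_full_house_alt
  simp only [PySem.Dict.items_counter, List.foldl_map]
  have h3 : (fun (acc : Option Int) (k : Int) =>
        if ((List.count k dice : Int) ≥ 3) then
          (match acc with | none => some k | some m => if k > m then some k else some m)
        else acc) = pvStep (fun f => decide ((List.count f dice : Int) ≥ 3)) := by
    funext acc k; simp [pvStep]
  rw [h3, pvScan_eq]
  cases ht : (PySem.List.sorted (PySem.Set.ofList dice) (fun x => x) true).find?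
      (fun f => decide ((List.count f dice : Int) ≥ 3)) with
  | none => simp
  | some t =>
    simp only
    have h2 : (fun (acc : Option Int) (k : Int) =>
          if (k ≠ t ∧ (List.count k dice : Int) ≥ 2) then
            (match acc with | none => some k | some m => if k > m then some k else some m)
          else acc) = pvStep (fun f => decide (f ≠ t ∧ (List.count f dice : Int) ≥ 2)) := by
      funext acc k; simp [pvStep]
    rw [h2, pvScan_eq]
    cases (PySem.List.sorted (PySem.Set.ofList dice) (fun x => x) true).find?
        (fun f => decide (f ≠ t ∧ (List.count f dice : Int) ≥ 2)) <;> simp
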